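-- pv_equiv track=rewrite | github.com/posl/comment_recommendation | script/split_gen/5_time/zh/192_B/5.py | is_hard_read
-- ===== SOURCE A (Python) =====
-- def is_hard_read(s):
--     l = len(s)
--     for i in range(0, l):
--         if i%2 == 0:
--             if s[i].islower():
--                 return False
--         else:
--             if s[i].isupper():
--                 return False
--     return True
-- ===== SOURCE B (Python) =====
-- def is_hard_read(s):
--     return (not any(c.islower() for c in s[0::2])
--             and not any(c.isupper() for c in s[1::2]))
-- ===== Notes on version B (the rewrite author's own statement) =====
-- stated objective: simpler
-- what changed: Replaces the index-driven loop with its i%2 branch and early returns by two declarative scans: slice the even and odd positions (s[0::2], s[1::2]) and check no lowercase in the former and no uppercase in the latter.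
import Mathlib
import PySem

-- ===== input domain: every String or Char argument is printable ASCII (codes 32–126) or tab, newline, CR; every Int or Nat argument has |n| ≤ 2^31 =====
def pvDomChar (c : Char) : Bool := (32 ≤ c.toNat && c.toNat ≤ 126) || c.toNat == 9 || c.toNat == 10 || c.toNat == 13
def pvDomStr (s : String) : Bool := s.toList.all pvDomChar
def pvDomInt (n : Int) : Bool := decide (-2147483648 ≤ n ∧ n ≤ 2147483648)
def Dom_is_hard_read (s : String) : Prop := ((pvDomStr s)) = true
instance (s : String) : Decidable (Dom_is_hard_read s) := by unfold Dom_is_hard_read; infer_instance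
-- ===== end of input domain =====

-- B replaces A's single index loop with its i%2 branch by two slice scans
-- (even positions must have no lowercase, odd positions no uppercase): simpler.

-- ===== PORT A =====
-- the 'for i in range(0,l)' loop with its early returns
def is_hard_read_go (cs : List Char) (i : Nat) : Bool :=
  if h : i < cs.length then
    (if i % 2 == 0 then
      if PySem.Chars.islower cs[i] then false else is_hard_read_go cs (i+1)
    else
      if PySem.Chars.isupper cs[i] then false else is_hard_read_go cs (i+1))
  else true
termination_by cs.length - i

def is_hard_read (s : String) : Bool := is_hard_read_go s.toList 0

-- ===== PORT B =====
-- s[k::2] : every second element, a direct port of step-2 slicing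
def pvEveryOther : List Char → List Char
  | [] => []
  | [c] => [c]
  | c :: _ :: rest => c :: pvEveryOther rest

def is_hard_read_alt (s : String) : Bool :=
  !(pvEveryOther s.toList).any (fun c => PySem.Chars.islower c)
    && !(pvEveryOther s.toList.tail).any (fun c => PySem.Chars.isupper c)

-- ===== PRECONDITION & SPEC =====
def Spec_is_hard_read (s : String) (out : Bool) : Prop := out = is_hard_read_alt s
instance (s : String) (out : Bool) : Decidable (Spec_is_hard_read s out) := by unfold Spec_is_hard_read; infer_instance

-- ===== CLAIM (what is proved, stated in full; the proofs are below) =====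
def Claim_equal_is_hard_read : Prop := ∀ (s : String), Dom_is_hard_read s → Spec_is_hard_read s (is_hard_read s)

-- ===== LEMMAS AND PROOFS =====

lemma pvEveryOther_cons (x : Char) (xs : List Char) :
    pvEveryOther (x :: xs) = x :: pvEveryOther xs.tail := by
  cases xs <;> simp [pvEveryOther]

lemma go_shift (a b : Char) : ∀ n (cs : List Char) (i : Nat), cs.length - i ≤ n →
    is_hard_read_go (a :: b :: cs) (i + 2) = is_hard_read_go cs i := by
  intro n
  induction n with
  | zero =>
    intro cs i h
    conv_lhs => rw [is_hard_read_go]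
    conv_rhs => rw [is_hard_read_go]
    simp only [List.length_cons]
    rw [dif_neg (by omega), dif_neg (by omega)]
  | succ n ih =>
    intro cs i h
    conv_lhs => rw [is_hard_read_go]
    conv_rhs => rw [is_hard_read_go]
    simp only [List.length_cons]
    by_cases hi : i < cs.length
    · rw [dif_pos (by omega), dif_pos hi]
      have hpar : ((i + 2) % 2 == 0) = (i % 2 == 0) := by
        have : (i + 2) % 2 = i % 2 := by omega
        rw [this]
      rw [hpar]; simp only [List.getElem_cons_succ]
      have h21 : i + 2 + 1 = i + 1 + 2 := by omega
      have hrec : is_hard_read_go (a :: b :: cs) (i + 1 + 2) = is_hard_read_go cs (i + 1) :=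
        ih cs (i + 1) (by omega)
      rw [h21, hrec]
      rfl
    · rw [dif_neg (by omega), dif_neg hi]

lemma go_eq_alt : ∀ (cs : List Char),
    is_hard_read_go cs 0 =
      (!(pvEveryOther cs).any (fun c => PySem.Chars.islower c)
        && !(pvEveryOther cs.tail).any (fun c => PySem.Chars.isupper c)) := by
  intro cs
  induction cs using pvEveryOther.induct with
  | case1 =>
    rw [is_hard_read_go]
    simp [pvEveryOther]
  | case2 c =>
    rw [is_hard_read_go]
    rw [dif_pos (by simp)]
    rw [is_hard_read_go]
    rw [dif_neg (by simp)]
    simp [pvEveryOther]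
  | case3 a b rest ih =>
    rw [is_hard_read_go]
    rw [dif_pos (by simp)]
    rw [is_hard_read_go]
    rw [dif_pos (by simp)]
    have hsh : is_hard_read_go (a :: b :: rest) 2 = is_hard_read_go rest 0 :=
      go_shift a b rest.length rest 0 (by omega)
    simp only [show (0:Nat) + 1 = 1 from rfl, show (1:Nat) + 1 = 2 from rfl] at *
    rw [hsh, ih]
    simp only [List.tail_cons, pvEveryOther, pvEveryOther_cons]
    cases h1 : PySem.Chars.islower ((a :: b :: rest)[0]) <;>
      cases h2 : PySem.Chars.isupper ((a :: b :: rest)[1]) <;>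
        simp_all [List.any_cons, Bool.and_comm]

-- ===== VERDICT (by name: the statement is the Claim_ definition above) =====
theorem is_hard_read_spec : Claim_equal_is_hard_read := by
  intro s _
  unfold Spec_is_hard_read is_hard_read is_hard_read_alt
  exact go_eq_alt s.toList
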